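-- pv_equiv track=rewrite | github.com/ASSERT-KTH/VRepair | src/process_fine_tune_data.py | remove_long_sequence
-- ===== SOURCE A (Python) =====
-- def remove_long_sequence(src_list, tgt_list, meta_list, max_src_length, max_tgt_length):
--     src_suitable_list = []
--     tgt_suitable_list = []
--     meta_suitable_list = []
--
--     for src, tgt, meta in zip(src_list, tgt_list, meta_list):
--         if len(src.split(' ')) <= max_src_length and len(tgt.split(' ')) <= max_tgt_length:
--             src_suitable_list.append(src)
--             tgt_suitable_list.append(tgt)
--             meta_suitable_list.append(meta)
--
--     return src_suitable_list, tgt_suitable_list, meta_suitable_list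
-- ===== SOURCE B (Python) =====
-- def remove_long_sequence(src_list, tgt_list, meta_list, max_src_length, max_tgt_length):
--     # len(s.split(' ')) == s.count(' ') + 1 for every string s (explicit separator),
--     # so token counting needs no intermediate list.  Select indices, then project.
--     n = min(len(src_list), len(tgt_list), len(meta_list))
--     idx = [i for i in range(n)
--            if src_list[i].count(' ') + 1 <= max_src_length
--            and tgt_list[i].count(' ') + 1 <= max_tgt_length]
--     return ([src_list[i] for i in idx],
--             [tgt_list[i] for i in idx],
--             [meta_list[i] for i in idx])
-- ===== Notes on version B (the rewrite author's own statement) =====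
-- stated objective: alternative
-- what changed: Replaces filtering zipped triples with three parallel appends by index-based selection: token lengths are computed arithmetically as count(' ')+1 instead of materialising split(' '), a kept-index list is built over range(min of lengths), and each output list is a separate projection of the inputs through that index list.
import Mathlib
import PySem

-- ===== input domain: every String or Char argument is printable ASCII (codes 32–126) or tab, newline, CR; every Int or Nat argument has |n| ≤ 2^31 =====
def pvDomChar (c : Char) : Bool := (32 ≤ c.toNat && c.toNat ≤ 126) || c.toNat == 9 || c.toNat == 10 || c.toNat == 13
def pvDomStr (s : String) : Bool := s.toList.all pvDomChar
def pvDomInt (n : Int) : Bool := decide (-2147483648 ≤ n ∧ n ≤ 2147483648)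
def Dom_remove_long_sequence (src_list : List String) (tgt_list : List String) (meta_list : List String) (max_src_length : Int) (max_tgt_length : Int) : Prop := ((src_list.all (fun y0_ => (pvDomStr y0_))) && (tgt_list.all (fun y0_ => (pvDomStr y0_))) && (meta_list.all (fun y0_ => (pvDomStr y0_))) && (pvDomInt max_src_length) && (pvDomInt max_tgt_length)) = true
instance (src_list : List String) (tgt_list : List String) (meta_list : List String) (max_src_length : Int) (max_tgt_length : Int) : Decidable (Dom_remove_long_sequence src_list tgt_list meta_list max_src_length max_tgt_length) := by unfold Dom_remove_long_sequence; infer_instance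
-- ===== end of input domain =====

-- B selects kept indices over range(min of lengths) using count(' ')+1 arithmetic and projects
-- each list through that index list, instead of A's zip-filter with three parallel appends; objective: alternative.

-- ===== PORT A =====
def remove_long_sequence (src_list : List String) (tgt_list : List String) (meta_list : List String) (max_src_length : Int) (max_tgt_length : Int) : List String × List String × List String :=
  (src_list.zip (tgt_list.zip meta_list)).foldl
    (fun (acc : List String × List String × List String) stm =>
      if ((PySem.Chars.splitOn stm.1.toList [' ']).length : Int) ≤ max_src_length ∧
         ((PySem.Chars.splitOn stm.2.1.toList [' ']).length : Int) ≤ max_tgt_length then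
        (acc.1 ++ [stm.1], acc.2.1 ++ [stm.2.1], acc.2.2 ++ [stm.2.2])
      else acc)
    ([], [], [])

-- ===== PORT B =====
-- s.count(' ') for a single-character argument is exactly List.count over the characters;
-- src_list[i] for i below every length is exact as getD (the default is never used).
def remove_long_sequence_alt (src_list : List String) (tgt_list : List String) (meta_list : List String) (max_src_length : Int) (max_tgt_length : Int) : List String × List String × List String :=
  let n := min (min src_list.length tgt_list.length) meta_list.length
  let idx := (List.range n).filter (fun i =>
      ((src_list.getD i "").toList.count ' ' + 1 : Int) ≤ max_src_length ∧
      ((tgt_list.getD i "").toList.count ' ' + 1 : Int) ≤ max_tgt_length)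
  (idx.map (fun i => src_list.getD i ""),
   idx.map (fun i => tgt_list.getD i ""),
   idx.map (fun i => meta_list.getD i ""))

-- ===== PRECONDITION & SPEC =====
def Spec_remove_long_sequence (src_list : List String) (tgt_list : List String) (meta_list : List String) (max_src_length : Int) (max_tgt_length : Int) (out : List String × List String × List String) : Prop := out = remove_long_sequence_alt src_list tgt_list meta_list max_src_length max_tgt_length
instance (src_list : List String) (tgt_list : List String) (meta_list : List String) (max_src_length : Int) (max_tgt_length : Int) (out : List String × List String × List String) : Decidable (Spec_remove_long_sequence src_list tgt_list meta_list max_src_length max_tgt_length out) := by unfold Spec_remove_long_sequence; infer_instance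

-- ===== CLAIM (what is proved, stated in full; the proofs are below) =====
def Claim_equal_remove_long_sequence : Prop := ∀ (src_list : List String) (tgt_list : List String) (meta_list : List String) (max_src_length : Int) (max_tgt_length : Int), Dom_remove_long_sequence src_list tgt_list meta_list max_src_length max_tgt_length → Spec_remove_long_sequence src_list tgt_list meta_list max_src_length max_tgt_length (remove_long_sequence src_list tgt_list meta_list max_src_length max_tgt_length)

-- ===== LEMMAS AND PROOFS =====

-- splitting on a single character yields count + 1 pieces
theorem pv_go_len (fuel : Nat) : ∀ (l cur : List Char) (acc : List (List Char)),
    l.length ≤ fuel →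
    (PySem.Chars.splitOn.go [' '] fuel l cur acc).length = acc.length + l.count ' ' + 1 := by
  induction fuel with
  | zero =>
    intro l cur acc h
    have : l = [] := List.eq_nil_of_length_eq_zero (Nat.le_zero.mp h)
    subst this
    unfold PySem.Chars.splitOn.go
    simp
  | succ fuel ih =>
    intro l cur acc h
    cases l with
    | nil =>
      unfold PySem.Chars.splitOn.go
      simp
    | cons c rest =>
      unfold PySem.Chars.splitOn.go
      by_cases hc : c = ' '
      · subst hc
        rw [if_pos (by simp [List.isPrefixOf])]
        rw [show List.drop [' '].length (' ' :: rest) = rest by simp]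
        rw [ih rest [] ((cur.reverse) :: acc) (by simpa using Nat.le_of_succ_le_succ h)]
        simp
        omega
      · rw [if_neg (by simp [List.isPrefixOf]; exact mt Eq.symm hc)]
        rw [ih rest (c :: cur) acc (by simpa using Nat.le_of_succ_le_succ h)]
        simp [hc]

theorem pv_splitOn_single_len (l : List Char) :
    (PySem.Chars.splitOn l [' ']).length = l.count ' ' + 1 := by
  unfold PySem.Chars.splitOn
  rw [pv_go_len _ l [] [] (by omega)]
  simp

-- A's fold accumulates the filtered triples, component-wise
theorem pv_foldA (p : String × String × String → Prop) [DecidablePred p]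
    (l : List (String × String × String)) (a b c : List String) :
    l.foldl (fun (acc : List String × List String × List String) stm =>
        if p stm then (acc.1 ++ [stm.1], acc.2.1 ++ [stm.2.1], acc.2.2 ++ [stm.2.2]) else acc)
      (a, b, c)
    = (a ++ (l.filter (fun stm => decide (p stm))).map (·.1),
       b ++ (l.filter (fun stm => decide (p stm))).map (·.2.1),
       c ++ (l.filter (fun stm => decide (p stm))).map (·.2.2)) := by
  induction l generalizing a b c with
  | nil => simp
  | cons h t ih =>
    by_cases hp : p h <;> simp [hp, ih]

-- filtering the zip and projecting = filtering indices and looking up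
theorem pv_core {α : Type} (p q : String → Bool) (f : String → String → String → α) :
    ∀ (l1 l2 l3 : List String),
    ((l1.zip (l2.zip l3)).filter (fun stm => p stm.1 && q stm.2.1)).map
        (fun stm => f stm.1 stm.2.1 stm.2.2)
    = ((List.range (min (min l1.length l2.length) l3.length)).filter
        (fun i => p (l1.getD i "") && q (l2.getD i ""))).map
        (fun i => f (l1.getD i "") (l2.getD i "") (l3.getD i "")) := by
  intro l1
  induction l1 with
  | nil => intro l2 l3; simp
  | cons a t1 ih =>
    intro l2 l3
    cases l2 with
    | nil => simp
    | cons b t2 =>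
      cases l3 with
      | nil => simp
      | cons c t3 =>
        simp only [List.zip_cons_cons, List.filter_cons, List.length_cons,
          Nat.succ_min_succ, List.range_succ_eq_map, List.filter_cons,
          List.getD_cons_zero]
        by_cases hp : (p a && q b) = true
        · simp [hp, List.filter_map, List.map_map, Function.comp_def, ih t2 t3, Nat.min_assoc]
        · simp [hp, List.filter_map, List.map_map, Function.comp_def, ih t2 t3, Nat.min_assoc]

-- ===== VERDICT (by name: the statement is the Claim_ definition above) =====
theorem remove_long_sequence_spec : Claim_equal_remove_long_sequence := by
  intro src_list tgt_list meta_list ms mt _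
  unfold Spec_remove_long_sequence remove_long_sequence remove_long_sequence_alt
  rw [pv_foldA (fun stm =>
      ((PySem.Chars.splitOn stm.1.toList [' ']).length : Int) ≤ ms ∧
      ((PySem.Chars.splitOn stm.2.1.toList [' ']).length : Int) ≤ mt)]
  simp only [List.nil_append]
  have hfe : ∀ (stm : String × String × String),
      (decide (((PySem.Chars.splitOn stm.1.toList [' ']).length : Int) ≤ ms ∧
               ((PySem.Chars.splitOn stm.2.1.toList [' ']).length : Int) ≤ mt))
      = ((fun s => decide (((s.toList.count ' ' : Int) + 1) ≤ ms)) stm.1 &&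
         (fun t => decide (((t.toList.count ' ' : Int) + 1) ≤ mt)) stm.2.1) := by
    intro stm
    rw [pv_splitOn_single_len, pv_splitOn_single_len, Bool.decide_and]
    push_cast
    rfl
  have hidx : ∀ (i : Nat),
      (decide (((src_list.getD i "").toList.count ' ' + 1 : Int) ≤ ms ∧
               ((tgt_list.getD i "").toList.count ' ' + 1 : Int) ≤ mt))
      = ((fun s => decide (((s.toList.count ' ' : Int) + 1) ≤ ms)) (src_list.getD i "") &&
         (fun t => decide (((t.toList.count ' ' : Int) + 1) ≤ mt)) (tgt_list.getD i "")) := by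
    intro i; rw [Bool.decide_and]
  refine Prod.ext ?_ (Prod.ext ?_ ?_)
  all_goals
    simp only [List.filter_congr (fun x _ => hfe x), List.filter_congr (fun x _ => hidx x)]
  · exact pv_core (fun s => decide (((s.toList.count ' ' : Int) + 1) ≤ ms))
      (fun t => decide (((t.toList.count ' ' : Int) + 1) ≤ mt))
      (fun s _ _ => s) src_list tgt_list meta_list
  · exact pv_core (fun s => decide (((s.toList.count ' ' : Int) + 1) ≤ ms))
      (fun t => decide (((t.toList.count ' ' : Int) + 1) ≤ mt))
      (fun _ t _ => t) src_list tgt_list meta_list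
  · exact pv_core (fun s => decide (((s.toList.count ' ' : Int) + 1) ≤ ms))
      (fun t => decide (((t.toList.count ' ' : Int) + 1) ≤ mt))
      (fun _ _ m => m) src_list tgt_list meta_list
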